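-- pv_equiv track=rewrite | github.com/inaciovasquez2020/cyclone-terminal-obstruction | scripts/cfi/cfi_construction.py | alternating_even_parity_rhs
-- ===== SOURCE A (Python) =====
-- def alternating_even_parity_rhs(G, flip=False):
--     V = sorted(G)
--     b = {v: 0 for v in V}
--     if flip:
--         for i, v in enumerate(V[:-1]):
--             b[v] = i & 1
--         s = 0
--         for v in V[:-1]:
--             s ^= b[v]
--         b[V[-1]] = s
--     return b
-- ===== SOURCE B (Python) =====
-- def alternating_even_parity_rhs(G, flip=False):
--     V = sorted(G)
--     if not flip:
--         return dict.fromkeys(V, 0)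
--     b = {v: i & 1 for i, v in enumerate(V[:-1])}
--     # XOR of the alternating bits 0,1,0,1,... over len(V)-1 positions, in closed form
--     b[V[-1]] = ((len(V) - 1) // 2) & 1
--     return b
-- ===== Notes on version B (the rewrite author's own statement) =====
-- stated objective: simpler
-- what changed: B drops A's zero-initialized dict and both mutation loops: it builds the parity dict in one comprehension and sets the last vertex's value by the closed form ((len(V)-1)//2)&1 instead of A's second XOR-accumulation pass; Pre_ excludes lists with duplicate elements when flip is true, where A's XOR over per-occurrence dict reads is an accident of iterating occurrences rather than keys.
-- outside the precondition, e.g. on alternating_even_parity_rhs([1, 1, 2], True): A returns {1: 1, 2: 0}, B returns {1: 1, 2: 1}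
import Mathlib
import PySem

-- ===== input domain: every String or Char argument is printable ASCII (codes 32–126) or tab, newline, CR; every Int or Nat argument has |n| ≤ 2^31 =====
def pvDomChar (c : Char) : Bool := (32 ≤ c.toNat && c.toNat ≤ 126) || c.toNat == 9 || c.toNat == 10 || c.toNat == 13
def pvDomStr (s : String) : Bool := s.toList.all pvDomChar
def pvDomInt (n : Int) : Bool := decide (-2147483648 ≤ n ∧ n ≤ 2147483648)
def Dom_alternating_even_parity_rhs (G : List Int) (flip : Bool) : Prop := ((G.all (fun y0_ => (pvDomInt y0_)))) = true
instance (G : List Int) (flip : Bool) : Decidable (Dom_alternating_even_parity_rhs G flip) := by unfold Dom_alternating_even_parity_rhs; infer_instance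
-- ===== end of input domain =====

-- B builds the dict in one comprehension and sets the last vertex via the closed form
-- ((len(V)-1)//2)&1 instead of A's init-to-zero dict plus two mutation loops (objective: simpler).

-- ===== PORT A =====
def alternating_even_parity_rhs (G : List Int) (flip : Bool) : List (Int × Int) :=
  let V := PySem.List.sorted G (fun x => x) false
  let b : PySem.Dict Int Int := V.foldl (fun d v => d.insert v 0) PySem.Dict.empty
  if flip then
    let b := (PySem.List.enumerate (PySem.List.slice V none (some (-1)))).foldl
      (fun d iv => d.insert iv.2 (PySem.Int.band iv.1 1)) b
    -- b[v]: every v of V[:-1] is a key of b, so the KeyError branch is unreachable; getD is exact here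
    let s := (PySem.List.slice V none (some (-1))).foldl
      (fun s v => PySem.Int.bxor s (b.getD v 0)) 0
    match PySem.List.pyGet? V (-1) with
    | some last => (b.insert last s).items
    | none => b.items  -- unreachable under Pre_: Python raises IndexError on the last-element access for empty V
  else b.items

-- ===== PORT B =====
def alternating_even_parity_rhs_alt (G : List Int) (flip : Bool) : List (Int × Int) :=
  let V := PySem.List.sorted G (fun x => x) false
  if !flip then
    (PySem.List.dedup V).map (fun v => (v, 0))   -- dict.fromkeys(V, 0)
  else
    let b : PySem.Dict Int Int :=
      (PySem.List.enumerate (PySem.List.slice V none (some (-1)))).foldl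
        (fun d iv => d.insert iv.2 (PySem.Int.band iv.1 1)) PySem.Dict.empty
    match PySem.List.pyGet? V (-1) with
    | some last =>
        (b.insert last (PySem.Int.band (PySem.Int.floordiv ((V.length : Int) - 1) 2) 1)).items
    | none => b.items  -- unreachable under Pre_: Python raises IndexError on the last-element access for empty V

-- ===== PRECONDITION & SPEC =====
-- Pre_ excludes flip=True with empty G, on which A (and B) raise IndexError at the last-element access, and
-- flip=True with duplicate elements in G, where A's XOR over per-occurrence dict reads and B's
-- closed form are two defensible answers for a corner no caller of a graph routine specifies.
def Pre_alternating_even_parity_rhs (G : List Int) (flip : Bool) : Prop :=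
  flip = true → (G ≠ [] ∧ G.Nodup)
instance (G : List Int) (flip : Bool) : Decidable (Pre_alternating_even_parity_rhs G flip) := by
  unfold Pre_alternating_even_parity_rhs; infer_instance

def pvWitness_alternating_even_parity_rhs : List Int × Bool := ([3, 1, 2], true)

def Spec_alternating_even_parity_rhs (G : List Int) (flip : Bool) (out : List (Int × Int)) : Prop := out = alternating_even_parity_rhs_alt G flip
instance (G : List Int) (flip : Bool) (out : List (Int × Int)) : Decidable (Spec_alternating_even_parity_rhs G flip out) := by unfold Spec_alternating_even_parity_rhs; infer_instance

-- ===== CLAIM (what is proved, stated in full; the proofs are below) =====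
def Claim_equal_alternating_even_parity_rhs : Prop := ∀ (G : List Int) (flip : Bool), Dom_alternating_even_parity_rhs G flip → Pre_alternating_even_parity_rhs G flip → Spec_alternating_even_parity_rhs G flip (alternating_even_parity_rhs G flip)

-- ===== LEMMAS AND PROOFS =====

-- the zero-init dict: every lookup with default 0 is 0
lemma pv_getD_zero_fold (V : List Int) (d : PySem.Dict Int Int) (k : Int) (h : d.getD k 0 = 0) :
    (V.foldl (fun d v => d.insert v 0) d).getD k 0 = 0 := by
  induction V generalizing d with
  | nil => exact h
  | cons v V ih =>
    refine ih _ ?_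
    rw [PySem.Dict.getD_insert]
    split <;> simp [h]

lemma pv_zero_fold_items (V : List Int) :
    (V.foldl (fun d v => d.insert v 0) (PySem.Dict.empty : PySem.Dict Int Int)).items
      = (PySem.List.dedup V).map (fun v => (v, (0 : Int))) := by
  set d := V.foldl (fun d v => d.insert v 0) (PySem.Dict.empty : PySem.Dict Int Int) with hd
  have hkeys : d.keys = PySem.Set.update PySem.Dict.empty.keys V :=
    PySem.Dict.keys_foldl_insert V (fun _ _ => 0) PySem.Dict.empty
  have hkeys' : d.keys = PySem.List.dedup V := by
    rw [hkeys, PySem.Dict.keys_empty, PySem.List.dedup_eq_ofList]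
    rfl
  have hnd : d.keys.Nodup :=
    PySem.Dict.nodup_keys_foldl_insert V (fun _ _ => 0) PySem.Dict.empty
      (by rw [PySem.Dict.keys_empty]; exact List.nodup_nil)
  rw [PySem.Dict.items_eq_map_keys d hnd 0, hkeys']
  refine List.map_congr_left (fun k _ => ?_)
  rw [hd, pv_getD_zero_fold V PySem.Dict.empty k (PySem.Dict.getD_empty k 0)]

-- the assignment loop does not touch keys outside W
lemma pv_loop_getD_not_mem (W : List Int) (s : Int) (d : PySem.Dict Int Int) (k : Int)
    (h : k ∉ W) :
    ((PySem.List.enumerate W s).foldl (fun d iv => d.insert iv.2 (PySem.Int.band iv.1 1)) d).getD k 0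
      = d.getD k 0 := by
  induction W generalizing s d with
  | nil => rfl
  | cons v W ih =>
    rw [PySem.List.enumerate_cons, List.foldl_cons,
        ih (s + 1) _ (fun hm => h (List.mem_cons_of_mem _ hm)),
        PySem.Dict.getD_insert, if_neg (fun hk => by subst hk; simp at h)]

-- on a duplicate-free W the assignment loop stores the index parity of each element
lemma pv_loop_getD_mem (W : List Int) (s : Int) (d : PySem.Dict Int Int)
    (hnd : W.Nodup) (i : Nat) (hi : i < W.length) :
    ((PySem.List.enumerate W s).foldl (fun d iv => d.insert iv.2 (PySem.Int.band iv.1 1)) d).getD W[i] 0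
      = PySem.Int.band (s + (i : Int)) 1 := by
  induction W generalizing s d i with
  | nil => simp at hi
  | cons v W ih =>
    rw [PySem.List.enumerate_cons, List.foldl_cons]
    cases i with
    | zero =>
      have hv : v ∉ W := (List.nodup_cons.mp hnd).1
      simp only [List.getElem_cons_zero]
      rw [pv_loop_getD_not_mem W (s + 1) _ v hv, PySem.Dict.getD_insert, if_pos rfl]
      norm_num
    | succ i =>
      simp only [List.getElem_cons_succ]
      rw [ih (s + 1) _ (List.nodup_cons.mp hnd).2 i (by simpa using hi)]
      congr 1
      push_cast
      ring

-- keys of the assignment loop's result (fresh distinct keys over the empty dict)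
lemma pv_loop_items_fresh (W : List Int) (hnd : W.Nodup) :
    ((PySem.List.enumerate W 0).foldl (fun d iv => d.insert iv.2 (PySem.Int.band iv.1 1))
        PySem.Dict.empty).items
      = (PySem.List.enumerate W 0).map (fun iv => (iv.2, PySem.Int.band iv.1 1)) := by
  have h := PySem.Dict.items_foldl_insert_fresh (d := (PySem.Dict.empty : PySem.Dict Int Int))
      (l := PySem.List.enumerate W 0) (k := fun iv => iv.2)
      (v := fun iv => PySem.Int.band iv.1 1)
      (by intro a _; rw [PySem.Dict.contains_empty])
      (by rw [PySem.List.map_snd_enumerate]; exact hnd)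
  simpa using h

-- XOR of the alternating bit sequence 0,1,0,1,… of length m, in Nat
lemma pv_xor_range (m : Nat) :
    (List.range m).foldl (fun s i => s ^^^ (i &&& 1)) 0 = (m / 2) &&& 1 := by
  induction m with
  | zero => rfl
  | succ m ih =>
    rw [List.range_succ, List.foldl_append, ih, List.foldl_cons, List.foldl_nil]
    rw [Nat.and_one_is_mod, Nat.and_one_is_mod, Nat.and_one_is_mod]
    rcases Nat.mod_two_eq_zero_or_one (m / 2) with h1 | h1 <;>
      rcases Nat.mod_two_eq_zero_or_one m with h2 | h2 <;>
      rw [h1, h2] <;> [skip; skip; skip; skip] <;> simp only [Nat.xor_self, Nat.zero_xor, Nat.xor_zero] <;> omega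

-- cast the Int xor fold to the Nat one
lemma pv_cast_xor_fold (l : List Nat) (a : Nat) :
    l.foldl (fun (s : Int) i => PySem.Int.bxor s ((i &&& 1 : Nat) : Int)) (a : Int)
      = ((l.foldl (fun s i => s ^^^ (i &&& 1)) a : Nat) : Int) := by
  induction l generalizing a with
  | nil => rfl
  | cons x l ih => rw [List.foldl_cons, List.foldl_cons, PySem.Int.bxor_natCast, ih]


lemma pv_dedup_append (W : List Int) (x : Int) :
    PySem.List.dedup (W ++ [x])
      = if x ∈ PySem.List.dedup W then PySem.List.dedup W else PySem.List.dedup W ++ [x] := by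
  rw [PySem.List.dedup_eq_ofList, PySem.List.dedup_eq_ofList, PySem.Set.ofList, PySem.Set.ofList,
      List.foldl_append]
  simp only [List.foldl_cons, List.foldl_nil, PySem.Set.add]
  by_cases h : x ∈ List.foldl PySem.Set.add PySem.Set.empty W
  · rw [if_pos (by simpa using h), if_pos (by simpa [PySem.List.dedup_eq_ofList, PySem.Set.ofList] using h)]
  · rw [if_neg (by simpa using h), if_neg (by simpa [PySem.List.dedup_eq_ofList, PySem.Set.ofList] using h)]

lemma pv_dedup_nodup (V : List Int) (h : V.Nodup) : PySem.List.dedup V = V := by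
  induction V using List.reverseRecOn with
  | nil => rfl
  | append_singleton W x ih =>
    have hnd := List.nodup_append.mp h
    have hxW : x ∉ W := fun hm => hnd.2.2 x hm x (by simp) rfl
    rw [pv_dedup_append, ih hnd.1, if_neg hxW]

lemma pv_update_subset (s : PySem.Set Int) (l : List Int) (h : ∀ x ∈ l, x ∈ s) :
    PySem.Set.update s l = s := by
  induction l generalizing s with
  | nil => rfl
  | cons x l ih =>
    rw [PySem.Set.update, List.foldl_cons]
    have hadd : PySem.Set.add s x = s := by
      simp [PySem.Set.add, h x (by simp)]
    rw [hadd]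
    exact ih s (fun y hy => h y (List.mem_cons_of_mem _ hy))

-- ===== VERDICT (by name: the statement is the Claim_ definition above) =====
theorem alternating_even_parity_rhs_spec : Claim_equal_alternating_even_parity_rhs := by
  intro G flip _ hpre
  unfold Spec_alternating_even_parity_rhs alternating_even_parity_rhs alternating_even_parity_rhs_alt
  cases flip with
  | false =>
    simpa using (pv_zero_fold_items (PySem.List.sorted G (fun x => x) false))
  | true =>
    obtain ⟨hGne, hGnd⟩ := hpre rfl
    set V := PySem.List.sorted G (fun x => x) false with hV
    have hne : V ≠ [] := by rw [hV, Ne, PySem.List.sorted_eq_nil_iff]; exact hGne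
    have hVnd : V.Nodup := ((PySem.List.sorted_perm G (fun x => x) false).nodup_iff).mpr hGnd
    set W := V.dropLast with hW
    set last := V.getLast hne with hlast
    have hVsplit : W ++ [last] = V := List.dropLast_append_getLast hne
    have hWnd : W.Nodup := (List.dropLast_sublist V).nodup hVnd
    have hlastW : last ∉ W := by
      have := hVsplit ▸ hVnd
      exact fun hm => (List.nodup_append.mp this).2.2 last hm last (by simp) rfl
    have hWV : ∀ x ∈ W, x ∈ V := fun x hx => List.dropLast_subset V hx
    have hlastV : last ∈ V := List.getLast_mem hne
    set m := W.length with hm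
    have hVlen : V.length = m + 1 := by rw [← hVsplit]; simp [hm]
    have hWs : PySem.List.slice V none (some (-1)) = W := PySem.List.slice_to_neg_one V
    have hpg : PySem.List.pyGet? V (-1) = some last := by
      rw [PySem.List.pyGet?_neg_one, List.getLast?_eq_some_getLast]
    simp only [hWs, hpg, Bool.not_true, Bool.false_eq_true, if_true, if_false]
    -- A's zero dict
    set b0 := V.foldl (fun d v => d.insert v 0) (PySem.Dict.empty : PySem.Dict Int Int) with hb0
    have hb0items : b0.items = V.map (fun v => (v, (0 : Int))) := by
      rw [hb0, pv_zero_fold_items, pv_dedup_nodup V hVnd]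
    have hb0keys : b0.keys = V := by
      show b0.items.map Prod.fst = V
      rw [hb0items, List.map_map]
      exact List.map_id V
    have hb0getD : ∀ k, b0.getD k 0 = 0 := fun k =>
      pv_getD_zero_fold V PySem.Dict.empty k (PySem.Dict.getD_empty k 0)
    -- A's assignment loop
    set b1 := (PySem.List.enumerate W 0).foldl
        (fun d iv => d.insert iv.2 (PySem.Int.band iv.1 1)) b0 with hb1
    have hb1keys : b1.keys = V := by
      rw [hb1]
      refine (PySem.Dict.keys_foldl_insert_key (PySem.List.enumerate W 0) (fun iv => iv.2)
        (fun _ iv => PySem.Int.band iv.1 1) b0).trans ?_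
      rw [PySem.List.map_snd_enumerate, hb0keys]
      exact pv_update_subset V W hWV
    have hb1nd : b1.keys.Nodup := hb1keys ▸ hVnd
    have hb1W : ∀ i : Nat, (hi : i < W.length) → b1.getD W[i] 0 = PySem.Int.band ((i : Int)) 1 := by
      intro i hi
      rw [hb1, pv_loop_getD_mem W 0 b0 hWnd i hi, zero_add]
    have hb1last : b1.getD last 0 = 0 := by
      rw [hb1, pv_loop_getD_not_mem W 0 b0 last hlastW, hb0getD]
    -- the common value at the last vertex
    have hmapW : W.map (fun v => b1.getD v 0) = (List.range m).map (fun i => ((i &&& 1 : Nat) : Int)) := by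
      apply List.ext_getElem (by simp [hm])
      intro i h1 h2
      simp only [List.getElem_map, List.getElem_range]
      rw [hb1W i (by simpa using h1)]
      exact_mod_cast PySem.Int.band_natCast i 1
    have hs : W.foldl (fun s v => PySem.Int.bxor s (b1.getD v 0)) 0
        = (((m / 2) &&& 1 : Nat) : Int) := by
      rw [← List.foldl_map, hmapW, List.foldl_map]
      rw [show ((0 : Int)) = ((0 : Nat) : Int) by norm_num, pv_cast_xor_fold, pv_xor_range]
    have hc : PySem.Int.band (PySem.Int.floordiv ((V.length : Int) - 1) 2) 1
        = (((m / 2) &&& 1 : Nat) : Int) := by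
      rw [hVlen]
      have h1 : ((m + 1 : Nat) : Int) - 1 = ((m : Nat) : Int) := by push_cast; ring
      rw [h1, show ((2 : Int)) = ((2 : Nat) : Int) by norm_num, PySem.Int.floordiv_natCast,
          show ((1 : Int)) = ((1 : Nat) : Int) by norm_num, PySem.Int.band_natCast]
    -- B's comprehension dict
    set bB := (PySem.List.enumerate W 0).foldl
        (fun d iv => d.insert iv.2 (PySem.Int.band iv.1 1)) (PySem.Dict.empty : PySem.Dict Int Int) with hbB
    have hbBitems : bB.items = (PySem.List.enumerate W 0).map (fun iv => (iv.2, PySem.Int.band iv.1 1)) := by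
      rw [hbB]; exact pv_loop_items_fresh W hWnd
    have hbBkeys : bB.keys = W := by
      show bB.items.map Prod.fst = W
      rw [hbBitems, List.map_map]
      exact PySem.List.map_snd_enumerate W 0
    -- assemble both items lists
    have hcontA : b1.contains last = true := by
      rw [PySem.Dict.contains_iff_mem_keys, hb1keys]; exact hlastV
    have hcontB : bB.contains last = false := by
      rw [← Bool.not_eq_true, PySem.Dict.contains_iff_mem_keys, hbBkeys]; exact hlastW
    have hb1items : b1.items = V.map (fun k => (k, b1.getD k 0)) :=
      PySem.Dict.items_eq_map_keys b1 hb1nd 0 |>.trans (by rw [hb1keys])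
    rw [PySem.Dict.items_insert_of_contains _ _ hcontA,
        PySem.Dict.items_insert_of_not_contains _ _ hcontB, hb1items, hbBitems, hs, hc,
        show V = W ++ [last] from hVsplit.symm, List.map_append, List.map_append]
    congr 1
    · apply List.ext_getElem (by simp)
      intro i h1 h2
      have hiW : i < W.length := by simpa using h1
      have hne' : (W[i] == last) = false := by
        simp only [beq_eq_false_iff_ne, ne_eq]
        exact fun hk => hlastW (hk ▸ W.getElem_mem hiW)
      simp only [List.getElem_map, hne', Bool.false_eq_true, if_false,
        PySem.List.getElem_enumerate]
      rw [hb1W i hiW]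
      simp
    · simp only [List.map_cons, List.map_nil, beq_self_eq_true, if_true]
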